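-- pv_equiv track=rewrite | github.com/alphaone/advent-of-code-py | src/y2025/day6.py | col_transpose
-- ===== SOURCE A (Python) =====
-- def col_transpose(lines: list[str]) -> list[list[str]]:
--     columns = []
--     for col_idx in reversed(range(len(lines[0]))):
--         col = []
--         for row in lines:
--             col.append(row[col_idx])
--
--         columns.append(col)
--
--     operands = []
--     result = []
--     for col in [*columns, [""]]:  # one extra col to flush
--         number_str = "".join(col[:-1]).strip()
--         operator = col[-1]
--         if number_str != "":
--             operands.append(number_str)
--         if operator in ("+", "*"):
--             operands.append(operator)
--
--         if number_str == "":
--             result.append(operands)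
--             operands = []
--
--     return result
-- ===== SOURCE B (Python) =====
-- def _groups(toks):
--     group = []
--     i = 0
--     while i < len(toks) and toks[i][0] != "":
--         t = toks[i]
--         group.append(t[0])
--         if t[1]:
--             group.append(t[1])
--         i += 1
--     if i == len(toks):
--         return [group]
--     sep_op = toks[i][1]
--     if sep_op:
--         group.append(sep_op)
--     return [group] + _groups(toks[i + 1:])
--
--
-- def col_transpose(lines: list[str]) -> list[list[str]]:
--     cols = ["".join(t) for t in zip(*lines)][::-1]
--     toks = [(c[:-1].strip(), c[-1] if c[-1] in ("+", "*") else "") for c in cols]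
--     return _groups(toks)
-- ===== Notes on version B (the rewrite author's own statement) =====
-- stated objective: alternative
-- what changed: A's fused flag-driven pass (with a sentinel flush column and a mutable operands accumulator) is replaced by: transpose via zip(*lines), tokenize each column once into (number, operator), then recursively partition the token list at separator columns.
import Mathlib
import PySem

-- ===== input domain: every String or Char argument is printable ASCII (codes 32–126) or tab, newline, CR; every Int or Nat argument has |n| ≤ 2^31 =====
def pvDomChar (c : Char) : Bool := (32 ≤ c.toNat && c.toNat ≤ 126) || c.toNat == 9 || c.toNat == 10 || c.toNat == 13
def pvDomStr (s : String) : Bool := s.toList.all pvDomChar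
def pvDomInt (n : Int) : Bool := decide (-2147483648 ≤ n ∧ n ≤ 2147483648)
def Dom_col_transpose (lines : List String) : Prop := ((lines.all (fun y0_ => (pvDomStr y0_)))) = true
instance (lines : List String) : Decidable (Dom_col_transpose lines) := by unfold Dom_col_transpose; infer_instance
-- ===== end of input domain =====

-- B replaces A's fused flag-driven flush loop (with its sentinel column) by: transpose via zip, tokenize every
-- column once, then recursively split the token list at separator columns; objective: alternative decomposition.

-- ===== PORT A =====
-- Python 'row[col_idx]' yields a 1-char string: ported as String.ofList [ch]; the .getD defaults only feed
-- indices that Pre_col_transpose excludes (there Python raises IndexError).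
def pvColsA (lines : List String) : List (List String) :=
  ((PySem.List.pyRange 0 (PySem.Str.len ((PySem.List.pyGet? lines 0).getD ""))).reverse).foldl
    (fun columns colIdx =>
      columns ++ [lines.foldl (fun col row =>
        col ++ [((PySem.Str.pyGet? row colIdx).map (fun ch => String.ofList [ch])).getD ""]) []])
    []

-- the second for-loop of A, with its (operands, result) state
def pvLoopA : List (List String) → List String → List (List String) → List (List String)
  | [], _, res => res
  | col :: cs, ops, res =>
      let numberStr := PySem.Str.strip (PySem.Str.join "" (PySem.List.slice col none (some (-1))))
      let op := (PySem.List.pyGet? col (-1)).getD ""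
      let ops1 := if numberStr ≠ "" then ops ++ [numberStr] else ops
      let ops2 := if op = "+" ∨ op = "*" then ops1 ++ [op] else ops1
      if numberStr = "" then pvLoopA cs [] (res ++ [ops2]) else pvLoopA cs ops2 res

def col_transpose (lines : List String) : List (List String) :=
  pvLoopA (pvColsA lines ++ [[""]]) [] []

-- ===== PORT B =====
-- zip(*rows) (truncates at the shortest row); the Nat fuel (first row's length) only guards termination
def pvZipStarGo : Nat → List (List Char) → List (List Char)
  | 0, _ => []
  | n+1, rows =>
      if rows.isEmpty || rows.any List.isEmpty then []
      else (rows.map (fun r => r.headD ' ')) :: pvZipStarGo n (rows.map List.tail)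

def pvZipStar (rows : List (List Char)) : List (List Char) :=
  pvZipStarGo (rows.headD []).length rows

-- token of one column string c: (c[:-1].strip(), c[-1] if c[-1] in ("+","*") else "")
def pvTok (c : String) : String × String :=
  (PySem.Str.strip (PySem.Str.slice c none (some (-1))),
   let last := ((PySem.Str.pyGet? c (-1)).map (fun ch => String.ofList [ch])).getD ""
   if last = "+" ∨ last = "*" then last else "")

-- _groups of Source B: the while loop collecting the leading non-separator tokens is the takeWhile/dropWhile split
def pvGroups : List (String × String) → List (List String)
  | ts =>
    let group := (ts.takeWhile (fun t => t.1 != "")).flatMap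
      (fun t => t.1 :: (if t.2 ≠ "" then [t.2] else []))
    match h : ts.dropWhile (fun t => t.1 != "") with
    | [] => [group]
    | s :: rest => (group ++ (if s.2 ≠ "" then [s.2] else [])) :: pvGroups rest
termination_by ts => ts.length
decreasing_by
  have h1 := List.length_dropWhile_le (fun t => t.1 != "") ts
  rw [h] at h1
  simp at h1
  omega

-- ''.join over a tuple of characters is the string of those characters; [::-1] is List.reverse
-- (PySem.List.slice?_none_none_neg_one)
def col_transpose_alt (lines : List String) : List (List String) :=
  pvGroups ((((pvZipStar (lines.map String.toList)).map (fun t => String.ofList t)).reverse).map pvTok)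

-- ===== PRECONDITION & SPEC =====
-- Pre_ is exactly where Python A returns: lines nonempty (else lines[0] raises IndexError) and no row
-- shorter than lines[0] (else row[col_idx] raises IndexError).
def Pre_col_transpose (lines : List String) : Prop :=
  lines ≠ [] ∧ ∀ s ∈ lines, PySem.Str.len (lines.headD "") ≤ PySem.Str.len s
instance (lines : List String) : Decidable (Pre_col_transpose lines) := by
  unfold Pre_col_transpose; infer_instance

def pvWitness_col_transpose : List String := ["12 4", "35+*"]

def Spec_col_transpose (lines : List String) (out : List (List String)) : Prop := out = col_transpose_alt lines
instance (lines : List String) (out : List (List String)) : Decidable (Spec_col_transpose lines out) := by unfold Spec_col_transpose; infer_instance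

-- ===== CLAIM (what is proved, stated in full; the proofs are below) =====
def Claim_equal_col_transpose : Prop := ∀ (lines : List String), Dom_col_transpose lines → Pre_col_transpose lines → Spec_col_transpose lines (col_transpose lines)

-- ===== LEMMAS AND PROOFS =====

-- prepend xs onto the first group
def pvConsHead (xs : List String) : List (List String) → List (List String)
  | [] => [xs]
  | g :: gs => (xs ++ g) :: gs

-- token-level grouping both ports are reduced to
def pvG : List (String × String) → List (List String)
  | [] => [[]]
  | t :: ts =>
      if t.1 = "" then (if t.2 ≠ "" then [t.2] else []) :: pvG ts
      else pvConsHead (t.1 :: (if t.2 ≠ "" then [t.2] else [])) (pvG ts)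

-- the token pvLoopA effectively consumes from an A-side column
def pvTokA (col : List String) : String × String :=
  (PySem.Str.strip (PySem.Str.join "" (PySem.List.slice col none (some (-1)))),
   let op := (PySem.List.pyGet? col (-1)).getD ""
   if op = "+" ∨ op = "*" then op else "")

theorem pvConsHead_ne_nil (xs : List String) (G : List (List String)) : pvConsHead xs G ≠ [] := by
  cases G <;> simp [pvConsHead]

theorem pvG_ne_nil (ts : List (String × String)) : pvG ts ≠ [] := by
  cases ts with
  | nil => simp [pvG]
  | cons t ts =>
      by_cases h : t.1 = "" <;> simp [pvG, h, pvConsHead_ne_nil]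

theorem pvConsHead_consHead (xs ys : List String) (G : List (List String)) :
    pvConsHead xs (pvConsHead ys G) = pvConsHead (xs ++ ys) G := by
  cases G <;> simp [pvConsHead]

theorem pvConsHead_nil_of_ne (G : List (List String)) (h : G ≠ []) : pvConsHead [] G = G := by
  cases G with
  | nil => exact absurd rfl h
  | cons g gs => simp [pvConsHead]

theorem pvGroups_nil : pvGroups [] = [[]] := by
  rw [pvGroups]
  split
  · simp
  · next s rest heq => simp at heq

theorem pvGroups_cons_sep (t : String × String) (ts : List (String × String)) (h : t.1 = "") :
    pvGroups (t :: ts) = (if t.2 ≠ "" then [t.2] else []) :: pvGroups ts := by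
  have hd : List.dropWhile (fun x => x.1 != "") (t :: ts) = t :: ts := by
    simp [List.dropWhile_cons, h]
  have ht : List.takeWhile (fun x => x.1 != "") (t :: ts) = [] := by
    simp [List.takeWhile_cons, h]
  rw [pvGroups]
  split
  · next heq => rw [hd] at heq; exact absurd heq (by simp)
  · next s rest heq =>
      rw [hd] at heq
      injection heq with h1 h2
      subst h1; subst h2
      rw [ht]
      simp

theorem pvGroups_cons (t : String × String) (ts : List (String × String)) (h : ¬ t.1 = "") :
    pvGroups (t :: ts) =
      pvConsHead (t.1 :: (if t.2 ≠ "" then [t.2] else [])) (pvGroups ts) := by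
  have hd : List.dropWhile (fun x => x.1 != "") (t :: ts)
      = List.dropWhile (fun x => x.1 != "") ts := by
    simp [List.dropWhile_cons, h]
  have ht : List.takeWhile (fun x => x.1 != "") (t :: ts)
      = t :: List.takeWhile (fun x => x.1 != "") ts := by
    simp [List.takeWhile_cons, h]
  conv_lhs => rw [pvGroups]
  split
  · next heq =>
      rw [hd] at heq
      have hts : pvGroups ts = [(ts.takeWhile (fun x => x.1 != "")).flatMap
          (fun t => t.1 :: (if t.2 ≠ "" then [t.2] else []))] := by
        conv_lhs => rw [pvGroups]
        split
        · rfl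
        · next s rest heq2 => rw [heq] at heq2; exact absurd heq2 (by simp)
      rw [ht, hts]
      simp [pvConsHead]
  · next s rest heq =>
      rw [hd] at heq
      have hts : pvGroups ts = ((ts.takeWhile (fun x => x.1 != "")).flatMap
            (fun t => t.1 :: (if t.2 ≠ "" then [t.2] else []))
          ++ (if s.2 ≠ "" then [s.2] else [])) :: pvGroups rest := by
        conv_lhs => rw [pvGroups]
        split
        · next heq2 => rw [heq] at heq2; exact absurd heq2.symm (by simp)
        · next s' rest' heq2 =>
            rw [heq] at heq2
            injection heq2 with h1 h2
            subst h1; subst h2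
            rfl
      rw [ht, hts]
      simp [pvConsHead]

theorem pvGroups_eq_pvG (ts : List (String × String)) : pvGroups ts = pvG ts := by
  induction ts with
  | nil => rw [pvGroups_nil]; rfl
  | cons t ts ih =>
      by_cases h : t.1 = ""
      · rw [pvGroups_cons_sep t ts h, ih]; simp [pvG, h]
      · rw [pvGroups_cons t ts h, ih]; simp [pvG, h]

theorem pvLoopA_eq (cs : List (List String)) :
    ∀ ops res, pvLoopA (cs ++ [[""]]) ops res = res ++ pvConsHead ops (pvG (cs.map pvTokA)) := by
  induction cs with
  | nil =>
      intro ops res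
      have h1 : PySem.Str.strip (PySem.Str.join "" (PySem.List.slice [""] none (some (-1)))) = "" := by
        decide
      have h2 : ((PySem.List.pyGet? ([""] : List String) (-1)).getD "" = "+" ∨
          (PySem.List.pyGet? ([""] : List String) (-1)).getD "" = "*") = False := by
        simp; decide
      simp only [List.nil_append, pvLoopA, h1, h2]
      simp [pvLoopA, pvG, pvConsHead]
  | cons col cs ih =>
      intro ops res
      simp only [List.cons_append, pvLoopA, List.map_cons]
      by_cases hn : PySem.Str.strip (PySem.Str.join "" (PySem.List.slice col none (some (-1)))) = ""
      · by_cases hop : (PySem.List.pyGet? col (-1)).getD "" = "+" ∨ (PySem.List.pyGet? col (-1)).getD "" = "*"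
        · have hne2 : (PySem.List.pyGet? col (-1)).getD "" ≠ "" := by
            rcases hop with h | h <;> rw [h] <;> decide
          simp only [hn, hop, if_true, if_neg (by simp : ¬("" : String) ≠ "")]
          rw [ih, pvConsHead_nil_of_ne _ (pvG_ne_nil _)]
          simp [pvG, pvTokA, hn, hop, hne2, pvConsHead]
        · simp only [hn, hop, if_false, if_neg (by simp : ¬("" : String) ≠ "")]
          rw [ih, pvConsHead_nil_of_ne _ (pvG_ne_nil _)]
          simp [pvG, pvTokA, hn, hop, pvConsHead]
      · by_cases hop : (PySem.List.pyGet? col (-1)).getD "" = "+" ∨ (PySem.List.pyGet? col (-1)).getD "" = "*"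
        · have hne2 : (PySem.List.pyGet? col (-1)).getD "" ≠ "" := by
            rcases hop with h | h <;> rw [h] <;> decide
          simp only [hn, hop, if_true, if_pos (by exact hn : _), ite_false]
          rw [ih]
          simp [pvG, pvTokA, hn, hop, hne2, ← pvConsHead_consHead]
        · simp only [hn, hop, if_false]
          rw [ih]
          simp [pvG, pvTokA, hn, hop, ← pvConsHead_consHead]

theorem pvZipStarGo_eq : ∀ (n : Nat) (rows : List (List Char)), rows ≠ [] →
    (rows.headD []).length = n → (∀ r ∈ rows, n ≤ r.length) →
    pvZipStarGo n rows = (List.range n).map (fun j => rows.map (fun r => r.getD j ' ')) := by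
  intro n
  induction n with
  | zero => intro rows _ _ _; simp [pvZipStarGo]
  | succ n ih =>
      intro rows hne hh hall
      have hie : rows.isEmpty = false := by simpa [List.isEmpty_iff] using hne
      have hany : rows.any List.isEmpty = false := by
        simp only [List.any_eq_false]
        intro r hr
        have := hall r hr
        cases r with
        | nil => simp at this
        | cons a l => simp
      rw [pvZipStarGo, hie, hany]
      simp only [Bool.or_self, if_neg (by simp : ¬(false : Bool) = true)]
      obtain ⟨r0, rest, rfl⟩ := List.exists_cons_of_ne_nil hne
      have hr0 : r0.length = n + 1 := by simpa using hh
      rw [ih ((r0 :: rest).map List.tail) (by simp) (by simp; omega)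
        (by
          intro r' hr'
          simp only [List.mem_map] at hr'
          obtain ⟨r, hr, rfl⟩ := hr'
          have := hall r hr
          simp [List.length_tail]
          omega)]
      rw [List.range_succ_eq_map]
      simp only [List.map_cons, List.map_map]
      congr 1
      · simp [List.head?_eq_getElem?]
      · apply List.map_congr_left
        intro j _
        simp [Nat.succ_eq_add_one]

theorem pvTok_eq (cs : List Char) :
    pvTokA (cs.map (fun ch => String.ofList [ch])) = pvTok (String.ofList cs) := by
  unfold pvTokA pvTok
  have hjoin : PySem.Str.join "" (PySem.List.slice (cs.map (fun ch => String.ofList [ch])) none (some (-1)))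
      = PySem.Str.slice (String.ofList cs) none (some (-1)) := by
    apply String.toList_inj.mp
    have h1 := PySem.Str.toList_join "" ((cs.map (fun ch => String.ofList [ch])).dropLast)
    have h2 := PySem.Str.slice_to_neg_one (String.ofList cs)
    rw [PySem.List.slice_to_neg_one, h1, h2, ← List.map_dropLast, List.map_map]
    have hc : (String.toList ∘ fun ch => String.ofList [ch]) = fun ch => [ch] := by
      funext ch; simp
    rw [hc]
    have h3 := PySem.Chars.join_nil_singletons cs.dropLast
    simpa using h3
  have hlast : PySem.List.pyGet? (cs.map (fun ch => String.ofList [ch])) (-1)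
      = (PySem.Str.pyGet? (String.ofList cs) (-1)).map (fun ch => String.ofList [ch]) := by
    rw [PySem.List.pyGet?_neg_one, List.getLast?_map]
    have hs : PySem.Str.pyGet? (String.ofList cs) (-1) = PySem.List.pyGet? cs (-1) := by
      simp [PySem.Str.pyGet?]
    rw [hs, PySem.List.pyGet?_neg_one]
  rw [hjoin, hlast]

set_option maxHeartbeats 400000 in
theorem pv_cols_eq (lines : List String) (hne : lines ≠ [])
    (hall : ∀ s ∈ lines, PySem.Str.len (lines.headD "") ≤ PySem.Str.len s) :
    (pvColsA lines).map pvTokA =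
      ((((pvZipStar (lines.map String.toList)).map (fun t => String.ofList t)).reverse).map pvTok) := by
  obtain ⟨l0, rest, rfl⟩ := List.exists_cons_of_ne_nil hne
  have hlen : ∀ s ∈ (l0 :: rest), l0.toList.length ≤ s.toList.length := by
    intro s hs
    have h := hall s hs
    rw [PySem.Str.len_eq, PySem.Str.len_eq] at h
    simp only [List.headD_cons] at h
    exact_mod_cast h
  have hA : pvColsA (l0 :: rest) =
      ((PySem.List.pyRange 0 ((l0.toList.length : Nat) : Int)).reverse).map
        (fun colIdx => (l0 :: rest).map
          (fun row => ((PySem.Str.pyGet? row colIdx).map (fun ch => String.ofList [ch])).getD "")) := by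
    unfold pvColsA
    rw [show (PySem.List.pyGet? (l0 :: rest) 0).getD "" = l0 by
      rw [PySem.List.pyGet?_zero_cons]; rfl]
    rw [PySem.Str.len_eq]
    simp only [PySem.List.foldl_append_singleton_eq_map, List.nil_append]
  have hB : pvZipStar ((l0 :: rest).map String.toList) =
      (List.range l0.toList.length).map
        (fun j => ((l0 :: rest).map String.toList).map (fun r => r.getD j ' ')) := by
    unfold pvZipStar
    rw [show (((l0 :: rest).map String.toList).headD []) = l0.toList by simp]
    exact pvZipStarGo_eq l0.toList.length _ (by simp) (by simp)
      (by
        intro r hr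
        simp only [List.mem_map] at hr
        obtain ⟨s, hs, rfl⟩ := hr
        exact hlen s hs)
  rw [hA, PySem.List.pyRange_zero_natCast, hB]
  simp only [List.map_reverse, List.map_map]
  rw [List.reverse_inj]
  apply List.map_congr_left
  intro j hj
  simp only [Function.comp_apply, Function.comp_def]
  have hcol : (l0 :: rest).map
      (fun row => ((PySem.Str.pyGet? row ((j : Nat) : Int)).map (fun ch => String.ofList [ch])).getD "")
      = ((l0 :: rest).map (fun s => s.toList.getD j ' ')).map (fun ch => String.ofList [ch]) := by
    simp only [List.map_map, Function.comp_def]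
    apply List.map_congr_left
    intro s hs
    have hjs : j < s.toList.length := lt_of_lt_of_le (List.mem_range.mp hj) (hlen s hs)
    rw [PySem.Str.pyGet?_natCast, List.getElem?_eq_getElem hjs]
    simp [List.getD, List.getElem?_eq_getElem hjs]
  rw [hcol, pvTok_eq]

-- ===== VERDICT (by name: the statement is the Claim_ definition above) =====
theorem col_transpose_spec : Claim_equal_col_transpose := by
  intro lines hdom hpre
  unfold Spec_col_transpose col_transpose col_transpose_alt
  obtain ⟨hne, hall⟩ := hpre
  rw [pvLoopA_eq, pvGroups_eq_pvG,
    pvConsHead_nil_of_ne _ (pvG_ne_nil _), List.nil_append,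
    pv_cols_eq lines hne hall]
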